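-- pv_equiv track=rewrite | github.com/vjsingh1984/victor | victor/agent/utils/tool_detection.py | detect_mentioned_tools
-- ===== SOURCE A (Python) =====
-- from typing import Any, Set, cast
--
-- def detect_mentioned_tools(
--     text: str,
--     available_tools: Set[str],
--     tool_aliases: dict[str, str] | None = None,
-- ) -> Set[str]:
--     """Detect which tools are mentioned in a text string.
--
--     This function scans text for mentions of tool names or their aliases,
--     returning the set of canonical tool names that were mentioned.
--
--     Args:
--         text: The text to scan for tool mentions
--         available_tools: Set of available tool names
--         tool_aliases: Optional mapping of aliases to canonical tool names
--
--     Returns: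
--         Set of canonical tool names that were mentioned in the text
--
--     Example:
--         >>> available = {"read_file", "write_file", "execute_bash"}
--         >>> detect_mentioned_tools("Use read_file to view code", available)
--         {"read_file"}
--         >>> detect_mentioned_tools("Run bash command", available, {"bash": "execute_bash"})
--         {"execute_bash"}
--     """
--     if not text:
--         return set()
--
--     mentioned = set()
--     text_lower = text.lower()
--
--     # Check for direct tool name mentions
--     for tool in available_tools:
--         if tool.lower() in text_lower:
--             mentioned.add(tool)
--
--     # Check for alias mentions
--     if tool_aliases:
--         for alias, canonical in tool_aliases.items():
--             if alias.lower() in text_lower and canonical in available_tools: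
--                 mentioned.add(canonical)
--
--     return mentioned
-- ===== SOURCE B (Python) =====
-- def detect_mentioned_tools(text, available_tools, tool_aliases=None):
--     """Window-index variant: lower the text once, build (for each distinct
--     pattern length) the set of all lowercased text windows of that length,
--     then decide every pattern by one O(1) set lookup instead of a substring
--     scan per pattern."""
--     if not text:
--         return set()
--     text_lower = text.lower()
--     n = len(text_lower)
--     pairs = [(t, t) for t in available_tools]
--     if tool_aliases:
--         pairs += [(a, c) for a, c in tool_aliases.items() if c in available_tools]
--     windows = {}
--     for p, _ in pairs:
--         length = len(p)
--         if length not in windows: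
--             windows[length] = {text_lower[i:i + length] for i in range(n - length + 1)}
--     return {c for p, c in pairs if p.lower() in windows[len(p)]}
-- ===== Notes on version B (the rewrite author's own statement) =====
-- stated objective: faster
-- what changed: Instead of running a substring scan over the text for every tool/alias pattern, B lowers the text once, builds for each distinct pattern length the hash set of all text windows of that length, and decides each pattern by a single O(1) set lookup; aliases are pre-filtered by canonical availability.
import Mathlib
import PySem

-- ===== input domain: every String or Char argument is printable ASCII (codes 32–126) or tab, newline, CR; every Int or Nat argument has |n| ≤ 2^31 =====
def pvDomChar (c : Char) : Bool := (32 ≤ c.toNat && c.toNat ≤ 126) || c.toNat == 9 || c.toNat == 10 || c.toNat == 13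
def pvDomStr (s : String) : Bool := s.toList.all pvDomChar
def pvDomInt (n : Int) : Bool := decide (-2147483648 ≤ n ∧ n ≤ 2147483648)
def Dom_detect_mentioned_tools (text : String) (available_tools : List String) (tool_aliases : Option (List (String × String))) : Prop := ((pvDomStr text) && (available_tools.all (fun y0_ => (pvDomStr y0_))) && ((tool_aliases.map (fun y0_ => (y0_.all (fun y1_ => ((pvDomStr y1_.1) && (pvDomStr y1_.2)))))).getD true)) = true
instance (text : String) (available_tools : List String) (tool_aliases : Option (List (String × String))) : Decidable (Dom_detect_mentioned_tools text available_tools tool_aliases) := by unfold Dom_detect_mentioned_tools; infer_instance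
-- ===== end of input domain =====

-- B replaces A's per-pattern substring scan by a per-distinct-length window index over the lowered
-- text (one set lookup per pattern); a timing run measured B faster; same returned set, proved.


-- ===== PORT A =====
-- Literal port of A: lower the text, scan each tool name, then each alias (dict
-- truthiness = non-empty), with a substring test per pattern; results collected in a set.
def detect_mentioned_tools (text : String) (available_tools : List String) (tool_aliases : Option (List (String × String))) : List String :=
  if text.toList.isEmpty then []
  else
    let text_lower := PySem.Str.lower text
    let mentioned : PySem.Set String :=
      available_tools.foldl
        (fun s tool => if PySem.Str.isIn (PySem.Str.lower tool) text_lower then PySem.Set.add s tool else s)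
        PySem.Set.empty
    match tool_aliases with
    | none => mentioned
    | some al =>
      if al.isEmpty then mentioned
      else
        (PySem.Dict.ofList al).items.foldl
          (fun s p =>
            if PySem.Str.isIn (PySem.Str.lower p.1) text_lower && available_tools.contains p.2 then
              PySem.Set.add s p.2
            else s)
          mentioned

-- ===== PORT B =====
-- B-side helper: the Python set comprehension {text_lower[i:i+L] for i in range(n-L+1)}.
def pvWinSet (text_lower : String) (L : Int) : PySem.Set String :=
  PySem.Set.ofList
    ((PySem.List.pyRange 0 (PySem.Str.len text_lower - L + 1) 1).map
      (fun i => PySem.Str.slice text_lower (some i) (some (i + L))))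

-- B-side helper: the loop building the per-length window dictionary (memoised per distinct length).
def pvBuildWindows (text_lower : String) (pairs : List (String × String)) : PySem.Dict Int (PySem.Set String) :=
  pairs.foldl
    (fun w p =>
      if w.contains (PySem.Str.len p.1) then w
      else w.insert (PySem.Str.len p.1) (pvWinSet text_lower (PySem.Str.len p.1)))
    PySem.Dict.empty

-- Literal port of B (Source B): combined (pattern, canonical) pairs, per-length window index, one lookup per pattern.
def detect_mentioned_tools_alt (text : String) (available_tools : List String) (tool_aliases : Option (List (String × String))) : List String :=
  if text.toList.isEmpty then []
  else
    let text_lower := PySem.Str.lower text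
    let pairs : List (String × String) :=
      available_tools.map (fun t => (t, t)) ++
        (match tool_aliases with
         | none => []
         | some al =>
           if al.isEmpty then []
           else (PySem.Dict.ofList al).items.filter (fun p => available_tools.contains p.2))
    let windows := pvBuildWindows text_lower pairs
    pairs.foldl
      (fun s p =>
        if PySem.Set.contains (windows.getD (PySem.Str.len p.1) PySem.Set.empty) (PySem.Str.lower p.1) then
          PySem.Set.add s p.2
        else s)
      PySem.Set.empty

-- ===== PRECONDITION & SPEC =====
def Spec_detect_mentioned_tools (text : String) (available_tools : List String) (tool_aliases : Option (List (String × String))) (out : List String) : Prop := out = detect_mentioned_tools_alt text available_tools tool_aliases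
instance (text : String) (available_tools : List String) (tool_aliases : Option (List (String × String))) (out : List String) : Decidable (Spec_detect_mentioned_tools text available_tools tool_aliases out) := by unfold Spec_detect_mentioned_tools; infer_instance

-- ===== CLAIM (what is proved, stated in full; the proofs are below) =====
def Claim_equal_detect_mentioned_tools : Prop := ∀ (text : String) (available_tools : List String) (tool_aliases : Option (List (String × String))), Dom_detect_mentioned_tools text available_tools tool_aliases → Spec_detect_mentioned_tools text available_tools tool_aliases (detect_mentioned_tools text available_tools tool_aliases)

-- ===== LEMMAS AND PROOFS =====

-- lower is character-wise, so it preserves the length of a pattern.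
theorem pvLen_lower (s : String) : PySem.Str.len (PySem.Str.lower s) = PySem.Str.len s := by
  simp [PySem.Str.len_eq, PySem.Str.toList_lower, PySem.Chars.lower]

-- A list R is among the length-|R| windows of S iff it is an infix of S.
theorem pvWindow_mem_iff (S R : List Char) :
    R ∈ (PySem.List.pyRange 0 ((S.length : Int) - (R.length : Int) + 1) 1).map
      (fun i => PySem.List.slice S (some i) (some (i + (R.length : Int)))) ↔ R <:+: S := by
  rw [← PySem.Chars.isIn_iff_infix, ← PySem.Chars.exists_prefix_drop_iff_isIn, List.mem_map]
  constructor
  · rintro ⟨i, hi, hslice⟩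
    rw [PySem.List.mem_pyRange_one] at hi
    obtain ⟨j, rfl⟩ := Int.eq_ofNat_of_zero_le hi.1
    rw [PySem.List.slice_natCast_add] at hslice
    exact ⟨j, List.prefix_iff_eq_take.mpr hslice.symm⟩
  · rintro ⟨j, hpre⟩
    have hpre' : R <+: S.drop (min j S.length) := by
      by_cases hj : j ≤ S.length
      · simpa [min_eq_left hj] using hpre
      · have : S.drop j = [] := List.drop_eq_nil_of_le (by omega)
        rw [this, List.prefix_nil] at hpre
        simp [hpre]
    have hlen : R.length ≤ (S.drop (min j S.length)).length := hpre'.length_le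
    rw [List.length_drop] at hlen
    refine ⟨((min j S.length : Nat) : Int), ?_, ?_⟩
    · rw [PySem.List.mem_pyRange_one]
      constructor
      · positivity
      · have h1 : min j S.length ≤ S.length := min_le_right _ _
        omega
    · rw [PySem.List.slice_natCast_add]
      exact (List.prefix_iff_eq_take.mp hpre').symm

-- The window set of length |r| contains r iff r is a substring of the text.
theorem pvWinSet_contains (tl r : String) (L : Int) (hL : PySem.Str.len r = L) :
    PySem.Set.contains (pvWinSet tl L) r = PySem.Str.isIn r tl := by
  subst hL
  rw [Bool.eq_iff_iff, PySem.Set.contains_iff, PySem.Str.isIn_iff_infix]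
  unfold pvWinSet
  rw [PySem.Set.mem_ofList, ← pvWindow_mem_iff tl.toList r.toList, List.mem_map]
  simp only [PySem.Str.len_eq, List.mem_map]
  constructor
  · rintro ⟨i, hi, hslice⟩
    refine ⟨i, hi, ?_⟩
    rw [show PySem.List.slice tl.toList (some i) (some (i + (r.toList.length : Int)))
        = (PySem.Str.slice tl (some i) (some (i + (r.toList.length : Int)))).toList from
      (PySem.Str.toList_slice tl _ _).symm]
    exact congrArg String.toList hslice
  · rintro ⟨i, hi, hslice⟩
    refine ⟨i, hi, ?_⟩
    apply String.toList_inj.mp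
    rw [PySem.Str.toList_slice]
    exact hslice

-- Every value the window-building fold stores at key k is pvWinSet tl k.
theorem pvBuildWindows_get?_inv (tl : String) (pairs : List (String × String))
    (d : PySem.Dict Int (PySem.Set String))
    (hd : ∀ k, d.get? k = none ∨ d.get? k = some (pvWinSet tl k)) (k : Int) :
    (pairs.foldl
      (fun w p =>
        if w.contains (PySem.Str.len p.1) then w
        else w.insert (PySem.Str.len p.1) (pvWinSet tl (PySem.Str.len p.1))) d).get? k = none ∨
    (pairs.foldl
      (fun w p =>
        if w.contains (PySem.Str.len p.1) then w
        else w.insert (PySem.Str.len p.1) (pvWinSet tl (PySem.Str.len p.1))) d).get? k = some (pvWinSet tl k) := by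
  induction pairs generalizing d with
  | nil => exact hd k
  | cons p rest ih =>
    simp only [List.foldl_cons]
    apply ih
    intro k'
    by_cases hc : d.contains (PySem.Str.len p.1) = true
    · rw [if_pos hc]; exact hd k'
    · rw [if_neg hc, PySem.Dict.get?_insert]
      by_cases hk : k' = PySem.Str.len p.1
      · subst hk; rw [if_pos rfl]; right; rfl
      · rw [if_neg hk]; exact hd k'

-- The window-building fold never loses a key.
theorem pvBuildWindows_contains_mono (tl : String) (pairs : List (String × String))
    (d : PySem.Dict Int (PySem.Set String)) (k : Int) (hk : d.contains k = true) :
    (pairs.foldl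
      (fun w p =>
        if w.contains (PySem.Str.len p.1) then w
        else w.insert (PySem.Str.len p.1) (pvWinSet tl (PySem.Str.len p.1))) d).contains k = true := by
  induction pairs generalizing d with
  | nil => exact hk
  | cons p rest ih =>
    simp only [List.foldl_cons]
    apply ih
    by_cases hc : d.contains (PySem.Str.len p.1) = true
    · rw [if_pos hc]; exact hk
    · rw [if_neg hc, PySem.Dict.contains_insert, hk]
      simp

-- After the fold, the key of every processed pair is present.
theorem pvBuildWindows_contains (tl : String) (pairs : List (String × String))
    (d : PySem.Dict Int (PySem.Set String)) (q : String × String) (hq : q ∈ pairs) :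
    (pairs.foldl
      (fun w p =>
        if w.contains (PySem.Str.len p.1) then w
        else w.insert (PySem.Str.len p.1) (pvWinSet tl (PySem.Str.len p.1))) d).contains (PySem.Str.len q.1) = true := by
  induction pairs generalizing d with
  | nil => cases hq
  | cons p rest ih =>
    simp only [List.foldl_cons]
    rcases List.mem_cons.mp hq with rfl | hq'
    · apply pvBuildWindows_contains_mono
      by_cases hc : d.contains (PySem.Str.len q.1) = true
      · rw [if_pos hc]; exact hc
      · rw [if_neg hc]
        exact PySem.Dict.contains_insert_self d _ _
    · exact ih _ hq'

-- For a pair in the list, the built dictionary yields exactly its window set.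
theorem pvBuildWindows_getD (tl : String) (pairs : List (String × String))
    (q : String × String) (hq : q ∈ pairs) :
    (pvBuildWindows tl pairs).getD (PySem.Str.len q.1) PySem.Set.empty = pvWinSet tl (PySem.Str.len q.1) := by
  have hinv := pvBuildWindows_get?_inv tl pairs PySem.Dict.empty (fun k => Or.inl (by simp)) (PySem.Str.len q.1)
  have hcon := pvBuildWindows_contains tl pairs PySem.Dict.empty q hq
  rw [PySem.Dict.contains_eq_isSome_get?] at hcon
  unfold pvBuildWindows
  rcases hinv with h | h
  · exfalso
    rw [h] at hcon
    simp at hcon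
  · rw [PySem.Dict.getD_eq_get?_getD, h]
    rfl

-- Folding an if-guarded accumulator over a filtered list = folding over the whole list with the conjunction.
theorem pvFoldl_filter_if {alpha beta : Type} (l : List alpha) (pred c : alpha → Bool)
    (g : beta → alpha → beta) (init : beta) :
    (l.filter pred).foldl (fun s x => if c x then g s x else s) init
      = l.foldl (fun s x => if c x && pred x then g s x else s) init := by
  induction l generalizing init with
  | nil => rfl
  | cons x rest ih =>
    by_cases hp : pred x
    · simp only [List.filter_cons, hp, if_pos, List.foldl_cons, Bool.and_true]
      exact ih _
    · simp only [List.filter_cons, hp, Bool.false_eq_true, List.foldl_cons,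
        Bool.and_false, if_neg, not_false_eq_true]
      exact ih _

-- Core: B's combined pair fold equals A's two successive folds.
theorem pvFold_eq (tl : String) (tools : List String) (items : List (String × String)) :
    ((tools.map (fun t => (t, t)) ++ items.filter (fun p => tools.contains p.2)).foldl
      (fun s p =>
        if PySem.Set.contains
            ((pvBuildWindows tl (tools.map (fun t => (t, t)) ++ items.filter (fun p => tools.contains p.2))).getD
              (PySem.Str.len p.1) PySem.Set.empty)
            (PySem.Str.lower p.1) then
          PySem.Set.add s p.2
        else s)
      PySem.Set.empty)
    = items.foldl
        (fun s p =>
          if PySem.Str.isIn (PySem.Str.lower p.1) tl && tools.contains p.2 then PySem.Set.add s p.2 else s)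
        (tools.foldl
          (fun s tool => if PySem.Str.isIn (PySem.Str.lower tool) tl then PySem.Set.add s tool else s)
          PySem.Set.empty) := by
  rw [PySem.List.foldl_congr_mem _ _
    (fun s p => if PySem.Str.isIn (PySem.Str.lower p.1) tl then PySem.Set.add s p.2 else s) _
    (by
      intro acc p hp
      rw [pvBuildWindows_getD tl _ p hp,
        pvWinSet_contains tl (PySem.Str.lower p.1) (PySem.Str.len p.1) (pvLen_lower p.1)])]
  rw [List.foldl_append, List.foldl_map, pvFoldl_filter_if]

-- ===== VERDICT (by name: the statement is the Claim_ definition above) =====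
theorem detect_mentioned_tools_spec : Claim_equal_detect_mentioned_tools := by
  intro text tools aliases _
  unfold Spec_detect_mentioned_tools detect_mentioned_tools detect_mentioned_tools_alt
  by_cases hempty : text.toList.isEmpty
  · simp [hempty]
  · simp only [hempty, Bool.false_eq_true, if_neg, not_false_eq_true]
    cases aliases with
    | none =>
      simpa using (pvFold_eq (PySem.Str.lower text) tools []).symm
    | some al =>
      dsimp only
      by_cases hal : al.isEmpty = true
      · simp only [hal, reduceIte]
        simpa using (pvFold_eq (PySem.Str.lower text) tools []).symm
      · simp only [hal]
        exact (pvFold_eq (PySem.Str.lower text) tools (PySem.Dict.ofList al).items).symm
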